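-- pv_equiv track=rewrite | github.com/mcelam00/Python-S.I.Pract06 | Descifrado.py | calcularExpresionBaseN
-- ===== SOURCE A (Python) =====
-- def calcularExpresionBaseN(m, k, N):
--
--     expresion = []
--     dividendo = m
--     divisor = N
--
--     if(dividendo < divisor):
--         expresion.append(dividendo)
--
--
--     while (dividendo >= divisor):
--
--         cociente = dividendo // divisor
--         if(cociente < divisor):
--             resto = dividendo % divisor
--             expresion.append(resto)
--             expresion.append(cociente)
--
--             break
--
--         resto = dividendo % divisor
--         dividendo = cociente
--         expresion.append(resto)
--
--     #si no llega a longitud k el bloque, completamos por la izda con 0 hasta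
--     #llegar a k (faltarían k-long actual 0 por completar)
--     if(len(expresion) != k):
--         for i in range(k-len(expresion)):
--             expresion.append(0)
--
--
--     #doy vuelta a la lista porque fuí añadiendo al final
--     return list(reversed(expresion))
-- ===== SOURCE B (Python) =====
-- def calcularExpresionBaseN(m, k, N):
--     # Recursive MSB-first digit expansion, padded on the left; no reversal step.
--     def digits(x):
--         if x < N:
--             return [x]
--         q, r = divmod(x, N)
--         return digits(q) + [r]
--     ds = digits(m)
--     return [0] * (k - len(ds)) + ds
-- ===== Notes on version B (the rewrite author's own statement) =====
-- stated objective: simpler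
-- what changed: A's iterative LSB-first division loop with a special break case, conditional zero-append pad and final list reversal is replaced by a direct recursive MSB-first digit expansion with a left pad, needing no reversal and no break special-case.
import Mathlib
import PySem

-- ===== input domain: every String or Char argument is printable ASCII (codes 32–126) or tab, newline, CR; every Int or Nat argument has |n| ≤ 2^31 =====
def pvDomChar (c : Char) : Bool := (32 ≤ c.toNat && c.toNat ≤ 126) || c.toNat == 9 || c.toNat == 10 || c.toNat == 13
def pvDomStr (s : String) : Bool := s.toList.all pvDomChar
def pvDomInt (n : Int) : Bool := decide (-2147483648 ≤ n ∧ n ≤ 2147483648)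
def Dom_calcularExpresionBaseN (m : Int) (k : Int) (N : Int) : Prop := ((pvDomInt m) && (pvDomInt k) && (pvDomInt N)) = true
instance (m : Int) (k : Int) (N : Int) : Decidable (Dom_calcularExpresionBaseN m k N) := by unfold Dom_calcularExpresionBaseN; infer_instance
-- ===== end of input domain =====

-- B replaces A's LSB-first division loop + reversal by a recursive MSB-first expansion with a left pad (objective: simpler).

-- ===== PORT A =====
-- the while loop; fuel is only a totality guard (under Pre_ the loop makes at most m.toNat steps)
def aLoop : Nat → Int → Int → List Int → List Int
  | 0, _, _, acc => acc
  | fuel+1, dividendo, divisor, acc =>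
    if divisor ≤ dividendo then
      let cociente := PySem.Int.floordiv dividendo divisor
      if cociente < divisor then
        acc ++ [PySem.Int.mod dividendo divisor, cociente]
      else
        aLoop fuel cociente divisor (acc ++ [PySem.Int.mod dividendo divisor])
    else acc

def calcularExpresionBaseN (m : Int) (k : Int) (N : Int) : List Int :=
  let e0 : List Int := if m < N then [m] else []
  let e1 := aLoop (m.toNat + 1) m N e0
  let e2 := if PySem.List.len e1 ≠ k then e1 ++ List.replicate (k - PySem.List.len e1).toNat 0 else e1
  e2.reverse

-- ===== PORT B =====
-- recursive MSB-first digits; fuel is only a totality guard (under Pre_ the recursion depth is at most m.toNat + 1)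
def altDigits : Nat → Int → Int → List Int
  | 0, x, _ => [x]
  | f+1, x, N =>
    if x < N then [x]
    else altDigits f (PySem.Int.floordiv x N) N ++ [PySem.Int.mod x N]

def calcularExpresionBaseN_alt (m : Int) (k : Int) (N : Int) : List Int :=
  let ds := altDigits (m.toNat + 2) m N
  List.replicate (k - PySem.List.len ds).toNat 0 ++ ds

-- ===== PRECONDITION & SPEC =====
-- Pre_ is exactly the set of inputs on which A terminates: outside it A raises ZeroDivisionError
-- (N = 0, 0 ≤ m) or loops forever (N = 1 with 1 ≤ m; N ≤ -1 with N ≤ m ≤ N*N).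
def Pre_calcularExpresionBaseN (m : Int) (k : Int) (N : Int) : Prop :=
  2 ≤ N ∨ m < N ∨ (N ≤ -1 ∧ N * N < m)
instance (m : Int) (k : Int) (N : Int) : Decidable (Pre_calcularExpresionBaseN m k N) := by
  unfold Pre_calcularExpresionBaseN; infer_instance
def pvWitness_calcularExpresionBaseN : Int × Int × Int := (5, 3, 2)

def Spec_calcularExpresionBaseN (m : Int) (k : Int) (N : Int) (out : List Int) : Prop := out = calcularExpresionBaseN_alt m k N
instance (m : Int) (k : Int) (N : Int) (out : List Int) : Decidable (Spec_calcularExpresionBaseN m k N out) := by unfold Spec_calcularExpresionBaseN; infer_instance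

-- ===== CLAIM (what is proved, stated in full; the proofs are below) =====
def Claim_equal_calcularExpresionBaseN : Prop := ∀ (m : Int) (k : Int) (N : Int), Dom_calcularExpresionBaseN m k N → Pre_calcularExpresionBaseN m k N → Spec_calcularExpresionBaseN m k N (calcularExpresionBaseN m k N)

-- ===== LEMMAS AND PROOFS =====

lemma altDigits_of_lt (f : Nat) (x N : Int) (h : x < N) : altDigits f x N = [x] := by
  cases f <;> simp [altDigits, h]

lemma fd_bounds {x N : Int} (hN : 2 ≤ N) (hx : N ≤ x) :
    0 ≤ PySem.Int.floordiv x N ∧ PySem.Int.floordiv x N < x := by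
  constructor
  · rw [PySem.Int.le_floordiv_iff_mul_le (by omega)]; omega
  · rw [PySem.Int.floordiv_lt_iff_lt_mul (by omega)]; nlinarith

lemma fd_neg {m N : Int} (hN : N ≤ -1) (hm : N * N < m) :
    PySem.Int.floordiv m N < N := by
  have hid := PySem.Int.floordiv_mul_add_mod m N
  have hb := PySem.Int.mod_neg_bounds m (show N < 0 by omega)
  by_contra h
  rw [not_lt] at h
  nlinarith [hb.1, hb.2]

lemma core (N : Int) (hN : 2 ≤ N) :
    ∀ f1 x f2 (acc : List Int), N ≤ x → x.toNat < f1 → x.toNat < f2 →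
      aLoop f1 x N acc = acc ++ (altDigits f2 x N).reverse := by
  intro f1
  induction f1 with
  | zero => intro x f2 acc _ h1 _; omega
  | succ g1 ih =>
    intro x f2 acc hx h1 h2
    obtain ⟨g2, rfl⟩ : ∃ g2, f2 = g2 + 1 := ⟨f2 - 1, by omega⟩
    have hb := fd_bounds hN hx
    simp only [aLoop, altDigits, if_pos hx, if_neg (not_lt.mpr hx)]
    by_cases hc : PySem.Int.floordiv x N < N
    · rw [if_pos hc, altDigits_of_lt g2 _ N hc]
      simp
    · rw [if_neg hc,
        ih (PySem.Int.floordiv x N) g2 (acc ++ [PySem.Int.mod x N]) (not_lt.mp hc) (by omega) (by omega)]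
      simp

lemma e1_eq (m N : Int) (hPre : 2 ≤ N ∨ m < N ∨ (N ≤ -1 ∧ N * N < m)) :
    aLoop (m.toNat + 1) m N (if m < N then [m] else []) =
      (altDigits (m.toNat + 2) m N).reverse := by
  by_cases hm : m < N
  · rw [if_pos hm, altDigits_of_lt]
    · show aLoop (m.toNat + 1) m N [m] = [m]
      simp [aLoop, not_le.mpr hm]
    · exact hm
  · rw [if_neg hm]
    rcases hPre with hN | hm' | ⟨hN, hmm⟩
    · exact core N hN (m.toNat + 1) m (m.toNat + 2) [] (not_lt.mp hm) (by omega) (by omega)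
    · exact absurd hm' hm
    · -- negative base, one division step: the quotient is already < N
      have hc : PySem.Int.floordiv m N < N := fd_neg hN hmm
      have hm2 : 2 ≤ m := by nlinarith
      obtain ⟨t, ht⟩ : ∃ t, m.toNat = t + 2 := ⟨m.toNat - 2, by omega⟩
      rw [ht]
      show aLoop (t + 2 + 1) m N [] = (altDigits (t + 2 + 2) m N).reverse
      simp only [aLoop, altDigits, if_pos (show N ≤ m by omega), if_pos hc,
        if_neg (not_lt.mpr (show N ≤ m by omega))]
      simp

-- ===== VERDICT (by name: the statement is the Claim_ definition above) =====
theorem calcularExpresionBaseN_spec : Claim_equal_calcularExpresionBaseN := by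
  intro m k N _ hPre
  have hPre' : 2 ≤ N ∨ m < N ∨ (N ≤ -1 ∧ N * N < m) := hPre
  show calcularExpresionBaseN m k N = calcularExpresionBaseN_alt m k N
  unfold calcularExpresionBaseN calcularExpresionBaseN_alt
  simp only [e1_eq m N hPre', PySem.List.len_eq, List.length_reverse]
  by_cases h : ((altDigits (m.toNat + 2) m N).length : Int) ≠ k
  · rw [if_pos h, List.reverse_append, List.reverse_reverse, List.reverse_replicate]
  · rw [if_neg h, List.reverse_reverse]
    have h0 : (k - ((altDigits (m.toNat + 2) m N).length : Int)).toNat = 0 := by omega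
    rw [h0]
    simp
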